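-- pv_equiv track=rewrite | github.com/gunhee0421/Algorithm | 프로그래머스/2/42586. 기능개발/기능개발.py | solution
-- ===== SOURCE A (Python) =====
-- import math
--
-- def solution(progresses, speeds):
--     answer = []
--
--     clearTime=[]
--
--     # 완성까지 걸리는 시간 배열
--     for i in range(len(progresses)):
--         clearTime.append(math.ceil((100-progresses[i])/speeds[i]))
--
--     count, max = 1, clearTime[0]
--     for i in range(1, len(clearTime)):
--         if max >= clearTime[i]:
--             count = count + 1
--         else:
--             answer.append(count)
--             count=1
--             max=clearTime[i]
--     answer.append(count)
--
--     return answer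
-- ===== SOURCE B (Python) =====
-- def solution(progresses, speeds):
--     # exact integer ceiling of (100 - p) / s (no floats)
--     clear = [-((p - 100) // s) for p, s in zip(progresses, speeds)]
--     # running prefix maximum of completion times
--     run = clear[:1]
--     for t in clear[1:]:
--         run.append(run[-1] if run[-1] >= t else t)
--     # a deployment starts exactly at index 0 and at each strict prefix-maximum record
--     bounds = [i for i in range(len(clear)) if i == 0 or clear[i] > run[i - 1]]
--     bounds.append(len(clear))
--     # group sizes are the gaps between consecutive deployment starts
--     return [b - a for a, b in zip(bounds, bounds[1:])]
-- ===== Notes on version B (the rewrite author's own statement) =====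
-- stated objective: alternative
-- what changed: B replaces A's single stateful count/max accumulator loop with staged passes over different intermediate data: exact integer-ceiling completion times, a prefix-maximum list, the list of deployment-start indices (index 0 plus every strict prefix-maximum record), and finally pairwise differences of consecutive start indices as the group sizes.
import Mathlib
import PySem

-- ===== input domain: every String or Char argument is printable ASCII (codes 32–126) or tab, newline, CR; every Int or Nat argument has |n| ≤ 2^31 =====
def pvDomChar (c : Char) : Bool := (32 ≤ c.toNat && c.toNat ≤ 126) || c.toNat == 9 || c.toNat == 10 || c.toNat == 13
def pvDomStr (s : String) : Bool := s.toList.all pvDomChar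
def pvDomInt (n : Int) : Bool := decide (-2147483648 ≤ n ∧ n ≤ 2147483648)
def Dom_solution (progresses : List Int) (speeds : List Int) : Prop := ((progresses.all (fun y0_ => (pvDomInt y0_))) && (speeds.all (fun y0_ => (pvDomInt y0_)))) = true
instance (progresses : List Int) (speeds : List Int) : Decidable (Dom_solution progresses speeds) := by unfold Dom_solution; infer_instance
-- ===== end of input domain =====

-- B is an alternative staged-pass decomposition (prefix-maximum records as deployment starts,
-- group sizes as differences of consecutive start indices); same O(n) cost, no speed claim.

-- ===== PORT A =====
-- math.ceil((100 - p) / s): on Dom (|ints| ≤ 2^31) the float division error is below 1/|s|,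
-- so the float ceil equals the exact ceiling -((p - 100) // s); we port it exactly.
def pvCeil (p s : Int) : Int := -(PySem.Int.floordiv (p - 100) s)

def solution (progresses : List Int) (speeds : List Int) : List Int :=
  -- for i in range(len(progresses)): clearTime.append(ceil((100-progresses[i])/speeds[i]))
  let clearTime := (PySem.List.pyRange 0 progresses.length 1).foldl
    (fun acc i => acc ++ [pvCeil (PySem.List.pyGetD progresses i 0) (PySem.List.pyGetD speeds i 0)]) []
  -- count, max = 1, clearTime[0]; for i in range(1, len(clearTime)): …
  let st := (PySem.List.pyRange 1 clearTime.length 1).foldl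
    (fun (st : List Int × Int × Int) i =>
      if st.2.2 ≥ PySem.List.pyGetD clearTime i 0 then (st.1, st.2.1 + 1, st.2.2)
      else (st.1 ++ [st.2.1], 1, PySem.List.pyGetD clearTime i 0))
    ([], 1, PySem.List.pyGetD clearTime 0 0)
  st.1 ++ [st.2.1]

-- ===== PORT B =====
def solution_alt (progresses : List Int) (speeds : List Int) : List Int :=
  -- clear = [-((p - 100) // s) for p, s in zip(progresses, speeds)]
  let clear := (progresses.zip speeds).map (fun ps => -(PySem.Int.floordiv (ps.1 - 100) ps.2))
  -- run = clear[:1]; for t in clear[1:]: run.append(run[-1] if run[-1] >= t else t)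
  -- (run[-1] is read only when run is nonempty, so the pyGetD default 0 is never used)
  let run := (PySem.List.slice clear (some 1) none).foldl
    (fun r t => r ++ [if PySem.List.pyGetD r (-1) 0 ≥ t then PySem.List.pyGetD r (-1) 0 else t])
    (PySem.List.slice clear none (some 1))
  -- bounds = [i for i in range(len(clear)) if i == 0 or clear[i] > run[i-1]]
  let bounds := (PySem.List.pyRange 0 clear.length 1).filter
    (fun i => (i == 0) || decide (PySem.List.pyGetD clear i 0 > PySem.List.pyGetD run (i - 1) 0))
  -- bounds.append(len(clear)); return [b - a for a, b in zip(bounds, bounds[1:])]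
  let bounds := bounds ++ [(clear.length : Int)]
  (bounds.zip (PySem.List.slice bounds (some 1) none)).map (fun ab => ab.2 - ab.1)

-- ===== PRECONDITION & SPEC =====
-- Exactly the inputs where A returns: nonempty progresses (else clearTime[0] raises IndexError),
-- speeds at least as long (else speeds[i] raises IndexError), and every used speed nonzero
-- (else ZeroDivisionError).
def Pre_solution (progresses : List Int) (speeds : List Int) : Prop :=
  progresses ≠ [] ∧ progresses.length ≤ speeds.length ∧
    ∀ x ∈ speeds.take progresses.length, x ≠ 0
instance (progresses : List Int) (speeds : List Int) : Decidable (Pre_solution progresses speeds) := by unfold Pre_solution; infer_instance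

def pvWitness_solution : List Int × List Int := ([30, 55, 99], [30, 5, 10])

def Spec_solution (progresses : List Int) (speeds : List Int) (out : List Int) : Prop := out = solution_alt progresses speeds
instance (progresses : List Int) (speeds : List Int) (out : List Int) : Decidable (Spec_solution progresses speeds out) := by unfold Spec_solution; infer_instance

-- ===== CLAIM (what is proved, stated in full; the proofs are below) =====
def Claim_equal_solution : Prop := ∀ (progresses : List Int) (speeds : List Int), Dom_solution progresses speeds → Pre_solution progresses speeds → Spec_solution progresses speeds (solution progresses speeds)


-- ===== LEMMAS AND PROOFS =====

-- proof-side abstractions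

-- A's accumulator loop, abstracted to the list it scans
def processA : List Int → Int → Int → List Int
  | [], _, c => [c]
  | x :: xs, mx, c => if mx ≥ x then processA xs mx (c + 1) else c :: processA xs x 1

-- A's fold produces processA
theorem foldA_eq_processA (t : List Int) : ∀ (ans : List Int) (c mx : Int),
    (let st := t.foldl
      (fun (st : List Int × Int × Int) x =>
        if st.2.2 ≥ x then (st.1, st.2.1 + 1, st.2.2) else (st.1 ++ [st.2.1], 1, x))
      (ans, c, mx)
     st.1 ++ [st.2.1]) = ans ++ processA t mx c := by
  induction t with
  | nil => intro ans c mx; simp [processA]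
  | cons x xs ih =>
    intro ans c mx
    by_cases hx : mx ≥ x
    · simp only [List.foldl_cons, if_pos hx, ih, processA]
    · simp only [List.foldl_cons, if_neg hx, ih, processA]
      simp

-- B-side abstractions: running maximum, record indices, consecutive differences
def maxI (m x : Int) : Int := if m ≥ x then m else x

def runAux : Int → List Int → List Int
  | _, [] => []
  | m, x :: xs => maxI m x :: runAux (maxI m x) xs

def recs : Int → Nat → List Int → List Int
  | _, _, [] => []
  | m, o, x :: xs => if m < x then (o : Int) :: recs x (o + 1) xs else recs m (o + 1) xs

def diffs (l : List Int) : List Int := (l.zip l.tail).map (fun ab => ab.2 - ab.1)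

-- B's run-building fold computes runAux
theorem runFold (xs : List Int) : ∀ (r : List Int) (m : Int) (h : r ≠ []), r.getLast h = m →
    xs.foldl (fun r t => r ++ [if PySem.List.pyGetD r (-1) 0 ≥ t then PySem.List.pyGetD r (-1) 0 else t]) r
      = r ++ runAux m xs := by
  induction xs with
  | nil => intro r m h hm; simp [runAux]
  | cons x xs ih =>
    intro r m h hm
    have hget : PySem.List.pyGetD r (-1) 0 = m := by
      rw [PySem.List.pyGetD_neg_one r 0 h, hm]
    rw [List.foldl_cons, hget]
    have h' : r ++ [maxI m x] ≠ [] := by simp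
    have hm' : (r ++ [maxI m x]).getLast h' = maxI m x := List.getLast_concat
    have := ih (r ++ [maxI m x]) (maxI m x) h' hm'
    simp only [maxI] at this ⊢
    rw [this, runAux, List.append_assoc]
    rfl

-- B's boundary filter computes recs, given that run carries the prefix maxima
theorem filterRecs (ct run : List Int) (l : List Int) : ∀ (j : Nat) (m : Int), 1 ≤ j →
    ct.drop j = l → run.drop (j - 1) = m :: runAux m l →
    (PySem.List.pyRange (j : Int) (ct.length : Int) 1).filter
        (fun i => (i == 0) || decide (PySem.List.pyGetD ct i 0 > PySem.List.pyGetD run (i - 1) 0))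
      = recs m j l := by
  induction l with
  | nil =>
    intro j m hj hct hrun
    have : ct.length ≤ j := by
      have := congrArg List.length hct; simp at this; omega
    rw [PySem.List.pyRange_one_eq_nil (by exact_mod_cast this)]
    rfl
  | cons x xs ih =>
    intro j m hj hct hrun
    have hjlt : j < ct.length := by
      have := congrArg List.length hct; simp at this; omega
    have hj1lt : j - 1 < run.length := by
      have := congrArg List.length hrun; simp at this; omega
    -- head values
    have hx : PySem.List.pyGetD ct (j : Int) 0 = x := by
      rw [PySem.List.pyGetD_natCast, List.getD_eq_getElem ct 0 hjlt]
      have : (ct.drop j)[0]'(by rw [hct]; simp) = ct[j] := by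
        rw [List.getElem_drop]; simp
      rw [← this]
      simp [hct]
    have hm : PySem.List.pyGetD run ((j : Int) - 1) 0 = m := by
      have hcast : (j : Int) - 1 = ((j - 1 : Nat) : Int) := by omega
      rw [hcast, PySem.List.pyGetD_natCast, List.getD_eq_getElem run 0 hj1lt]
      have : (run.drop (j - 1))[0]'(by rw [hrun]; simp) = run[j - 1] := by
        rw [List.getElem_drop]; simp
      rw [← this]
      simp [hrun]
    have hne0 : ((j : Int) == 0) = false := by
      simp only [beq_eq_false_iff_ne, ne_eq]
      omega
    have hctsucc : ct.drop (j + 1) = xs := by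
      have : ct.drop (j + 1) = (ct.drop j).drop 1 := by
        rw [List.drop_drop]
      rw [this, hct]; rfl
    have hrunsucc : run.drop j = maxI m x :: runAux (maxI m x) xs := by
      have : run.drop j = (run.drop (j - 1)).drop 1 := by
        rw [List.drop_drop]; congr 1; omega
      rw [this, hrun]; rfl
    rw [PySem.List.pyRange_one_cons (by exact_mod_cast hjlt), List.filter_cons]
    simp only [hne0, hx, hm, Bool.false_or]
    by_cases hlt : m < x
    · rw [if_pos (by simpa using hlt)]
      have hmaxx : maxI m x = x := by simp [maxI]; omega
      have := ih (j + 1) x (by omega) hctsucc (by simpa [hmaxx, Nat.add_sub_cancel] using hrunsucc)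
      push_cast at this
      rw [this, recs, if_pos hlt]
    · rw [if_neg (by simpa using hlt)]
      have hmaxm : maxI m x = m := by simp [maxI]; omega
      have := ih (j + 1) m (by omega) hctsucc (by simpa [hmaxm, Nat.add_sub_cancel] using hrunsucc)
      push_cast at this
      rw [this, recs, if_neg hlt]

-- consecutive differences of (prev :: record indices ++ [end]) are A's group counts
theorem diffs_recs (t : List Int) : ∀ (m prev : Int) (o : Nat),
    diffs ((prev :: recs m o t) ++ [((o + t.length : Nat) : Int)]) = processA t m ((o : Int) - prev) := by
  induction t with
  | nil => intro m prev o; simp [recs, diffs, processA]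
  | cons x xs ih =>
    intro m prev o
    by_cases hlt : m < x
    · rw [recs, if_pos hlt]
      have hend : ((o + (x :: xs).length : Nat) : Int) = ((o + 1 + xs.length : Nat) : Int) := by
        push_cast [List.length_cons]; ring
      have step : diffs ((prev :: (o : Int) :: recs x (o + 1) xs) ++ [((o + 1 + xs.length : Nat) : Int)])
          = ((o : Int) - prev) :: diffs (((o : Int) :: recs x (o + 1) xs) ++ [((o + 1 + xs.length : Nat) : Int)]) := rfl
      rw [hend, step, ih x (o : Int) (o + 1)]
      rw [processA, if_neg (by omega)]
      congr 1
      push_cast; ring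
    · rw [recs, if_neg hlt]
      have hend : ((o + (x :: xs).length : Nat) : Int) = ((o + 1 + xs.length : Nat) : Int) := by
        push_cast [List.length_cons]; ring
      rw [hend, ih m prev (o + 1)]
      rw [processA, if_pos (by omega)]
      congr 1
      push_cast; ring

-- ===== VERDICT (by name: the statement is the Claim_ definition above) =====
theorem solution_spec : Claim_equal_solution := by
  intro p s _hdom hpre
  obtain ⟨hne, hlen, _hz⟩ := hpre
  unfold Spec_solution solution solution_alt
  have hct : (PySem.List.pyRange 0 (p.length : Int) 1).foldl
      (fun acc i => acc ++ [pvCeil (PySem.List.pyGetD p i 0) (PySem.List.pyGetD s i 0)]) []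
      = (p.zip s).map (fun ps => -(PySem.Int.floordiv (ps.1 - 100) ps.2)) := by
    rw [PySem.List.pyRange_one, List.foldl_map,
      PySem.List.foldl_append_singleton_eq_map, List.nil_append]
    apply List.ext_getElem
    · simp
      omega
    · intro i h1 h2
      have hip : i < p.length := by simp at h1; omega
      have his : i < s.length := by omega
      simp only [List.getElem_map, List.getElem_range, List.getElem_zip]
      rw [Int.zero_add, PySem.List.pyGetD_natCast, PySem.List.pyGetD_natCast,
        List.getD_eq_getElem p 0 hip, List.getD_eq_getElem s 0 his]
      rfl
  rw [hct]
  obtain ⟨h, t, hht⟩ : ∃ h t, (p.zip s).map (fun ps => -(PySem.Int.floordiv (ps.1 - 100) ps.2)) = h :: t := by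
    have hzlen : (p.zip s).length = p.length := by rw [List.length_zip]; omega
    have hpos : 0 < p.length := List.length_pos_iff.mpr hne
    cases hz : (p.zip s).map (fun ps => -(PySem.Int.floordiv (ps.1 - 100) ps.2)) with
    | nil =>
      have := congrArg List.length hz
      rw [List.length_map, hzlen] at this
      simp only [List.length_nil] at this
      exact absurd (List.length_eq_zero_iff.mp this) hne
    | cons h t => exact ⟨h, t, rfl⟩
  rw [hht]
  -- A side: reduce to processA t h 1
  have hfold := PySem.List.foldl_pyRange_pyGetD' (h :: t) 0
    (fun (st : List Int × Int × Int) x =>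
      if st.2.2 ≥ x then (st.1, st.2.1 + 1, st.2.2) else (st.1 ++ [st.2.1], 1, x))
    ([], 1, PySem.List.pyGetD (h :: t) 0 0) (a := 1) (by omega)
  simp only [hfold]
  rw [PySem.List.pyGetD_zero_cons]
  have hA := foldA_eq_processA ((h :: t).drop (1 : Int).toNat) [] 1 h
  simp only [Int.toNat_one, List.drop_one, List.tail_cons] at hA ⊢
  rw [hA, List.nil_append]
  -- B side: reduce to processA t h 1
  have hsliceTo : PySem.List.slice (h :: t) none (some 1) = [h] := by
    have := PySem.List.slice_to_natCast (h :: t) 1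
    simpa using this
  have hsliceFrom : PySem.List.slice (h :: t) (some 1) none = t := by
    rw [PySem.List.slice_from_one]; rfl
  rw [hsliceTo, hsliceFrom]
  have hrun := runFold t [h] h (by simp) (by simp)
  rw [hrun, List.singleton_append]
  have hbounds : (PySem.List.pyRange 0 ((h :: t).length : Int) 1).filter
      (fun i => (i == 0) || decide (PySem.List.pyGetD (h :: t) i 0 > PySem.List.pyGetD (h :: runAux h t) (i - 1) 0))
      = (0 : Int) :: recs h 1 t := by
    rw [PySem.List.pyRange_one_cons (by simp)]
    rw [List.filter_cons]
    simp only [show ((0 : Int) == 0) = true from rfl, Bool.true_or, if_pos]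
    congr 1
    have := filterRecs (h :: t) (h :: runAux h t) t 1 h (by omega) (by rfl) (by rfl)
    simpa using this
  rw [hbounds]
  rw [PySem.List.slice_from_one]
  have hG := diffs_recs t h 0 1
  norm_num at hG
  have hlenEq : (((h :: t).length : Nat) : Int) = ((1 + t.length : Nat) : Int) := by
    push_cast [List.length_cons]; ring
  rw [show (((h :: t).length : Nat) : Int) = ((1 + t.length : Nat) : Int) from hlenEq]
  exact hG.symm
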